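-- pv_equiv track=rewrite | github.com/aizanzafar/crane | kg/fol_vaq_rad.py | apply_rules_to_kg
-- ===== SOURCE A (Python) =====
-- def remove_duplicate(kg_triplets):
--     """
--     Remove duplicate triplets.
--     """
--     res = []
--     [res.append(x) for x in kg_triplets if x not in res]
--     return res
--
-- def parse_triple(kg_triplets):
--     """
--     Parse triplets to ensure each has at least 20 entries, filling with placeholders if needed.
--     """
--     kg_len = len(kg_triplets)
--     empty = ["_NAF_H", "_NAF_R", "_NAF_O"]
--     if kg_len <= 20:
--         tt = 20 - kg_len
--         for _ in range(tt):
--             kg_triplets.append(empty)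
--     return kg_triplets
--
-- def apply_rules_to_kg(kg_triplets):
--     """
--     Apply logical rules to the knowledge graph triplets and return the parsed results.
--     """
--     co_occurs_triplets = []
--     prevent_triplets = []
--     treatment_triplets = []
--     diagnosis_triplets = []
--     conjunction_triplets = []
--     disjunction_triplets = []
--
--     # 1. Rule of Co-occurrence
--     for triplet in kg_triplets:
--         if triplet[1] == "co-occurs_with":
--             for other_triplet in kg_triplets:
--                 if other_triplet[0] == triplet[2] and other_triplet[1] == "affects":
--                     if triplet[0] != other_triplet[2]:
--                         co_occurs_triplets.append([triplet[0], "affects", other_triplet[2]])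
--
--     # 2. Rule of Prevention and Causation
--     for triplet in kg_triplets:
--         if triplet[1] == "prevents":
--             for other_triplet in kg_triplets:
--                 if other_triplet[0] == triplet[2] and other_triplet[1] == "causes":
--                     if triplet[0] != other_triplet[2]:
--                         prevent_triplets.append([triplet[0], "prevents", other_triplet[2]])
--
--     # 3. Rule of Treatment and Classification
--     for triplet in kg_triplets:
--         if triplet[1] == "treats":
--             for other_triplet in kg_triplets:
--                 if other_triplet[0] == triplet[2] and other_triplet[1] == "is_a":
--                     if triplet[0] != other_triplet[2]:
--                         treatment_triplets.append([triplet[0], "treats", other_triplet[2]])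
--
--     # 4. Rule of Diagnosis and Interaction
--     for triplet in kg_triplets:
--         if triplet[1] == "diagnoses":
--             for other_triplet in kg_triplets:
--                 if other_triplet[0] == triplet[0] and other_triplet[1] == "interacts_with":
--                     if other_triplet[2] != triplet[0]:
--                         diagnosis_triplets.append([other_triplet[2], "diagnoses", triplet[2]])
--
--     # 5. Rule of Conjunction
--     for triplet in kg_triplets:
--         if triplet[1] == "co-occurs_with":
--             for other_triplet in kg_triplets:
--                 if other_triplet[0] == triplet[0] and other_triplet[1] == "affects":
--                     if triplet[2] != other_triplet[2]:
--                         conjunction_triplets.append([triplet[2], "co-occurs_with", other_triplet[2]])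
--
--     # 6. Rule of Disjunction
--     for triplet in kg_triplets:
--         if triplet[1] == "prevents":
--             X = triplet[0]
--             Y = triplet[2]
--             for other_triplet in kg_triplets:
--                 if other_triplet[1] == "causes" and other_triplet[0] == Y:
--                     Z = other_triplet[2]
--                     disjunction_triplets.append([X, "prevents", Z])
--                     disjunction_triplets.append([X, "causes", Z])
--
--     # Parse and remove duplicates
--     return (
--         parse_triple(remove_duplicate(co_occurs_triplets)),
--         parse_triple(remove_duplicate(prevent_triplets)),
--         parse_triple(remove_duplicate(treatment_triplets)),
--         parse_triple(remove_duplicate(diagnosis_triplets)),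
--         parse_triple(remove_duplicate(conjunction_triplets)),
--         parse_triple(remove_duplicate(disjunction_triplets)),
--     )
-- ===== SOURCE B (Python) =====
-- _NAF = ["_NAF_H", "_NAF_R", "_NAF_O"]
--
--
-- def _index(triples, pred):
--     # subject -> list of objects of all `pred` triplets, in input order
--     idx = {}
--     for t in triples:
--         if t[1] == pred:
--             idx.setdefault(t[0], []).append(t[2])
--     return idx
--
--
-- def _pairs(triples, pred):
--     # (subject, object) of all `pred` triplets, in input order
--     return [(t[0], t[2]) for t in triples if t[1] == pred]
--
--
-- def _dedup(triplets):
--     seen = set()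
--     out = []
--     for x in triplets:
--         key = tuple(x)
--         if key not in seen:
--             seen.add(key)
--             out.append(x)
--     return out
--
--
-- def _pad(triplets):
--     return triplets + [_NAF] * (20 - len(triplets))
--
--
-- def apply_rules_to_kg(kg_triplets):
--     # only well-formed triplets (three fields) can take part in a join
--     wf = [t for t in kg_triplets if len(t) >= 3]
--     affects = _index(wf, "affects")
--     causes = _index(wf, "causes")
--     is_a = _index(wf, "is_a")
--     interacts = _index(wf, "interacts_with")
--     cooc = _pairs(wf, "co-occurs_with")
--     prev = _pairs(wf, "prevents")
--     trea = _pairs(wf, "treats")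
--     diag = _pairs(wf, "diagnoses")
--
--     co_occurs = [[x, "affects", z] for (x, y) in cooc for z in affects.get(y, []) if x != z]
--     prevent = [[x, "prevents", z] for (x, y) in prev for z in causes.get(y, []) if x != z]
--     treatment = [[x, "treats", z] for (x, y) in trea for z in is_a.get(y, []) if x != z]
--     diagnosis = [[z, "diagnoses", y] for (x, y) in diag for z in interacts.get(x, []) if z != x]
--     conjunction = [[y, "co-occurs_with", z] for (x, y) in cooc for z in affects.get(x, []) if y != z]
--     disjunction = [trip for (x, y) in prev for z in causes.get(y, [])
--                    for trip in ([x, "prevents", z], [x, "causes", z])]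
--
--     return (
--         _pad(_dedup(co_occurs)),
--         _pad(_dedup(prevent)),
--         _pad(_dedup(treatment)),
--         _pad(_dedup(diagnosis)),
--         _pad(_dedup(conjunction)),
--         _pad(_dedup(disjunction)),
--     )
-- ===== Notes on version B (the rewrite author's own statement) =====
-- stated objective: alternative
-- what changed: Replaces the six quadratic nested scans by a hash-join over the well-formed (3-field) triplets: one pass indexes triplets by predicate into subject->objects dicts and (subject,object) pair lists, each rule becomes a comprehension over dict lookups, duplicates are removed with a seen-set instead of 'x not in res' list scans, and padding is a closed-form list multiply.
import Mathlib
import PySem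

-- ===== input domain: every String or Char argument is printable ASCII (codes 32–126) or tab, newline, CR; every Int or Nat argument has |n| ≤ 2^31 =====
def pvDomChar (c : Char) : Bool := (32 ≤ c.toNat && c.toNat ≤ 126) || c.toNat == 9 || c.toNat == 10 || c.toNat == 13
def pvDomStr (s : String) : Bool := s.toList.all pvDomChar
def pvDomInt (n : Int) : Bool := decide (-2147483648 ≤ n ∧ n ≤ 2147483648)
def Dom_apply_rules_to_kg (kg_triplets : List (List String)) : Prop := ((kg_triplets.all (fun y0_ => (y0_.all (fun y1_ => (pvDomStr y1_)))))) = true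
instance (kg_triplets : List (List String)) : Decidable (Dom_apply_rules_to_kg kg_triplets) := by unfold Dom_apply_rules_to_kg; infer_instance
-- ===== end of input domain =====

-- B replaces A's six quadratic nested scans by hash-joins over the well-formed (3-field) triplets:
-- one indexing pass per predicate, seen-set dedup instead of 'x not in res' scans, closed-form padding
-- (objective: alternative; return value only — neither program observably mutates its argument).

-- shared indexing helper: t[i] for 0 ≤ i; the "" default is never read where Python reads t[i] on inputs admitted by Pre_
def pvIdx (t : List String) (i : Nat) : String := (PySem.List.pyGet? t (Int.ofNat i)).getD ""

def pvNAF : List String := ["_NAF_H", "_NAF_R", "_NAF_O"]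

-- ===== PORT A =====
def pvRemoveDuplicate (kg : List (List String)) : List (List String) :=
  kg.foldl (fun res x => if res.contains x then res else res ++ [x]) []

def pvParseTriple (kg : List (List String)) : List (List String) :=
  if kg.length ≤ 20 then
    (PySem.List.pyRange 0 (20 - (kg.length : Int)) 1).foldl (fun acc _ => acc ++ [pvNAF]) kg
  else kg

def pvRule1 (kg : List (List String)) : List (List String) :=
  kg.foldl (fun acc t =>
    if pvIdx t 1 == "co-occurs_with" then
      kg.foldl (fun a o =>
        if pvIdx o 0 == pvIdx t 2 && pvIdx o 1 == "affects" then
          (if pvIdx t 0 != pvIdx o 2 then a ++ [[pvIdx t 0, "affects", pvIdx o 2]] else a)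
        else a) acc
    else acc) []

def pvRule2 (kg : List (List String)) : List (List String) :=
  kg.foldl (fun acc t =>
    if pvIdx t 1 == "prevents" then
      kg.foldl (fun a o =>
        if pvIdx o 0 == pvIdx t 2 && pvIdx o 1 == "causes" then
          (if pvIdx t 0 != pvIdx o 2 then a ++ [[pvIdx t 0, "prevents", pvIdx o 2]] else a)
        else a) acc
    else acc) []

def pvRule3 (kg : List (List String)) : List (List String) :=
  kg.foldl (fun acc t =>
    if pvIdx t 1 == "treats" then
      kg.foldl (fun a o =>
        if pvIdx o 0 == pvIdx t 2 && pvIdx o 1 == "is_a" then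
          (if pvIdx t 0 != pvIdx o 2 then a ++ [[pvIdx t 0, "treats", pvIdx o 2]] else a)
        else a) acc
    else acc) []

def pvRule4 (kg : List (List String)) : List (List String) :=
  kg.foldl (fun acc t =>
    if pvIdx t 1 == "diagnoses" then
      kg.foldl (fun a o =>
        if pvIdx o 0 == pvIdx t 0 && pvIdx o 1 == "interacts_with" then
          (if pvIdx o 2 != pvIdx t 0 then a ++ [[pvIdx o 2, "diagnoses", pvIdx t 2]] else a)
        else a) acc
    else acc) []

def pvRule5 (kg : List (List String)) : List (List String) :=
  kg.foldl (fun acc t =>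
    if pvIdx t 1 == "co-occurs_with" then
      kg.foldl (fun a o =>
        if pvIdx o 0 == pvIdx t 0 && pvIdx o 1 == "affects" then
          (if pvIdx t 2 != pvIdx o 2 then a ++ [[pvIdx t 2, "co-occurs_with", pvIdx o 2]] else a)
        else a) acc
    else acc) []

def pvRule6 (kg : List (List String)) : List (List String) :=
  kg.foldl (fun acc t =>
    if pvIdx t 1 == "prevents" then
      kg.foldl (fun a o =>
        if pvIdx o 1 == "causes" && pvIdx o 0 == pvIdx t 2 then
          (a ++ [[pvIdx t 0, "prevents", pvIdx o 2]]) ++ [[pvIdx t 0, "causes", pvIdx o 2]]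
        else a) acc
    else acc) []

def apply_rules_to_kg (kg_triplets : List (List String)) : List (List String) × List (List String) × List (List String) × List (List String) × List (List String) × List (List String) :=
  (pvParseTriple (pvRemoveDuplicate (pvRule1 kg_triplets)),
   pvParseTriple (pvRemoveDuplicate (pvRule2 kg_triplets)),
   pvParseTriple (pvRemoveDuplicate (pvRule3 kg_triplets)),
   pvParseTriple (pvRemoveDuplicate (pvRule4 kg_triplets)),
   pvParseTriple (pvRemoveDuplicate (pvRule5 kg_triplets)),
   pvParseTriple (pvRemoveDuplicate (pvRule6 kg_triplets)))

-- ===== PORT B =====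
-- wf = [t for t in kg_triplets if len(t) >= 3]
def pvWf (kg : List (List String)) : List (List String) :=
  kg.filter (fun t => 3 ≤ t.length)

-- _index: subject -> list of objects of all `pred` triplets (idx.setdefault(t[0], []).append(t[2]) is Dict.modify)
def pvBIndex (kg : List (List String)) (pred : String) : PySem.Dict String (List String) :=
  kg.foldl (fun d t =>
    if pvIdx t 1 == pred then d.modify (pvIdx t 0) [] (fun l => l ++ [pvIdx t 2]) else d)
    PySem.Dict.empty

-- _pairs: (subject, object) of all `pred` triplets
def pvBPairs (kg : List (List String)) (pred : String) : List (String × String) :=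
  (kg.filter (fun t => pvIdx t 1 == pred)).map (fun t => (pvIdx t 0, pvIdx t 2))

-- _dedup with a seen-set
def pvBDedup (l : List (List String)) : List (List String) :=
  (l.foldl (fun (st : PySem.Set (List String) × List (List String)) x =>
      if PySem.Set.contains st.1 x then st else (PySem.Set.add st.1 x, st.2 ++ [x]))
    ((PySem.Set.empty : PySem.Set (List String)), ([] : List (List String)))).2

-- _pad: triplets + [NAF] * (20 - len), the multiplier clamped at 0
def pvBPad (l : List (List String)) : List (List String) :=
  l ++ List.replicate (20 - (l.length : Int)).toNat pvNAF

def apply_rules_to_kg_alt (kg_triplets : List (List String)) : List (List String) × List (List String) × List (List String) × List (List String) × List (List String) × List (List String) :=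
  let wf := pvWf kg_triplets
  let affects := pvBIndex wf "affects"
  let causes := pvBIndex wf "causes"
  let is_a := pvBIndex wf "is_a"
  let interacts := pvBIndex wf "interacts_with"
  let cooc := pvBPairs wf "co-occurs_with"
  let prev := pvBPairs wf "prevents"
  let trea := pvBPairs wf "treats"
  let diag := pvBPairs wf "diagnoses"
  let co_occurs := cooc.flatMap (fun p => ((affects.getD p.2 []).filter (fun z => p.1 != z)).map (fun z => [p.1, "affects", z]))
  let prevent := prev.flatMap (fun p => ((causes.getD p.2 []).filter (fun z => p.1 != z)).map (fun z => [p.1, "prevents", z]))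
  let treatment := trea.flatMap (fun p => ((is_a.getD p.2 []).filter (fun z => p.1 != z)).map (fun z => [p.1, "treats", z]))
  let diagnosis := diag.flatMap (fun p => ((interacts.getD p.1 []).filter (fun z => z != p.1)).map (fun z => [z, "diagnoses", p.2]))
  let conjunction := cooc.flatMap (fun p => ((affects.getD p.1 []).filter (fun z => p.2 != z)).map (fun z => [p.2, "co-occurs_with", z]))
  let disjunction := prev.flatMap (fun p => (causes.getD p.2 []).flatMap (fun z => [[p.1, "prevents", z], [p.1, "causes", z]]))
  (pvBPad (pvBDedup co_occurs), pvBPad (pvBDedup prevent), pvBPad (pvBDedup treatment),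
   pvBPad (pvBDedup diagnosis), pvBPad (pvBDedup conjunction), pvBPad (pvBDedup disjunction))

-- ===== PRECONDITION & SPEC =====
-- Pre_ excludes EXACTLY the inputs on which Python A raises IndexError (and nothing A returns on): a triplet
-- shorter than 2 fields, a co-occurs_with/prevents/treats triplet shorter than 3 fields, or a short (2-field)
-- triplet whose missing third field a firing join rule would actually read.
def Pre_apply_rules_to_kg (kg_triplets : List (List String)) : Prop :=
  (∀ t ∈ kg_triplets, 2 ≤ t.length) ∧
  (∀ t ∈ kg_triplets, (t.getD 1 "" = "co-occurs_with" ∨ t.getD 1 "" = "prevents" ∨ t.getD 1 "" = "treats") → 3 ≤ t.length) ∧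
  (∀ t ∈ kg_triplets, t.getD 1 "" = "diagnoses" → ∀ o ∈ kg_triplets, o.getD 1 "" = "interacts_with" → o.getD 0 "" = t.getD 0 "" →
      3 ≤ o.length ∧ (t.length < 3 → o.getD 2 "" = t.getD 0 "")) ∧
  (∀ o ∈ kg_triplets, o.getD 1 "" = "affects" → o.length < 3 → ∀ s ∈ kg_triplets, s.getD 1 "" = "co-occurs_with" →
      s.getD 2 "" ≠ o.getD 0 "" ∧ s.getD 0 "" ≠ o.getD 0 "") ∧
  (∀ o ∈ kg_triplets, o.getD 1 "" = "causes" → o.length < 3 → ∀ s ∈ kg_triplets, s.getD 1 "" = "prevents" →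
      s.getD 2 "" ≠ o.getD 0 "") ∧
  (∀ o ∈ kg_triplets, o.getD 1 "" = "is_a" → o.length < 3 → ∀ s ∈ kg_triplets, s.getD 1 "" = "treats" →
      s.getD 2 "" ≠ o.getD 0 "")
instance (kg_triplets : List (List String)) : Decidable (Pre_apply_rules_to_kg kg_triplets) := by
  unfold Pre_apply_rules_to_kg; infer_instance

def pvWitness_apply_rules_to_kg : List (List String) :=
  [["a", "co-occurs_with", "b"], ["b", "affects", "c"]]

-- DecidableEq for the 6-tuple output, assembled stepwise (instance search stops one component short of this size)
def pvDecEq2 : DecidableEq (List (List String) × List (List String)) := instDecidableEqProd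
def pvDecEq3 : DecidableEq (List (List String) × List (List String) × List (List String)) := @instDecidableEqProd _ _ _ pvDecEq2
def pvDecEq4 : DecidableEq (List (List String) × List (List String) × List (List String) × List (List String)) := @instDecidableEqProd _ _ _ pvDecEq3
def pvDecEq5 : DecidableEq (List (List String) × List (List String) × List (List String) × List (List String) × List (List String)) := @instDecidableEqProd _ _ _ pvDecEq4
def pvDecEq6 : DecidableEq (List (List String) × List (List String) × List (List String) × List (List String) × List (List String) × List (List String)) := @instDecidableEqProd _ _ _ pvDecEq5

def Spec_apply_rules_to_kg (kg_triplets : List (List String)) (out : List (List String) × List (List String) × List (List String) × List (List String) × List (List String) × List (List String)) : Prop := out = apply_rules_to_kg_alt kg_triplets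
instance (kg_triplets : List (List String)) (out : List (List String) × List (List String) × List (List String) × List (List String) × List (List String) × List (List String)) : Decidable (Spec_apply_rules_to_kg kg_triplets out) := by
  unfold Spec_apply_rules_to_kg; exact pvDecEq6 _ _

-- ===== CLAIM (what is proved, stated in full; the proofs are below) =====
def Claim_equal_apply_rules_to_kg : Prop := ∀ (kg_triplets : List (List String)), Dom_apply_rules_to_kg kg_triplets → Pre_apply_rules_to_kg kg_triplets → Spec_apply_rules_to_kg kg_triplets (apply_rules_to_kg kg_triplets)

-- ===== LEMMAS AND PROOFS =====

-- pvIdx is List.getD (Python raises exactly out of range; Pre_ keeps those reads in range)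
theorem pv_idx_getD (t : List String) (i : Nat) : pvIdx t i = t.getD i "" := by
  simp only [pvIdx, PySem.List.pyGet?, PySem.List.pyIdx?, List.getD_eq_getElem?_getD]
  by_cases h : i < t.length
  · simp [h]
  · simp [h]

-- outer loop: a fold that conditionally extends the accumulator is a flatMap
theorem pv_foldl_outer {α β : Type} (c : α → Bool) (G : α → List β) :
    ∀ (l : List α) (acc : List β),
      l.foldl (fun a t => if c t then a ++ G t else a) acc
        = acc ++ l.flatMap (fun t => if c t then G t else []) := by
  intro l
  induction l with
  | nil => intro acc; simp
  | cons t l ih =>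
    intro acc
    by_cases h : c t
    · simp only [List.foldl_cons, List.flatMap_cons, h, if_true]
      rw [ih, List.append_assoc]
    · simp only [List.foldl_cons, List.flatMap_cons]
      rw [if_neg h, if_neg h, ih, List.nil_append]

theorem pv_foldl_outer' {α β : Type} (c : α → Bool) (F : List β → α → List β) (G : α → List β)
    (hF : ∀ a t, F a t = a ++ G t) (l : List α) (acc : List β) :
    l.foldl (fun a t => if c t then F a t else a) acc
      = acc ++ l.flatMap (fun t => if c t then G t else []) := by
  have hfun : (fun (a : List β) (t : α) => if c t then F a t else a)
      = (fun (a : List β) (t : α) => if c t then a ++ G t else a) := by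
    funext a t; by_cases h : c t <;> simp [h, hF]
  rw [hfun, pv_foldl_outer]

-- inner loop of rules 1–5: filter twice, append one element each time
theorem pv_foldl_inner1 {α β : Type} (P Q : α → Bool) (e : α → β) :
    ∀ (l : List α) (acc : List β),
      l.foldl (fun a o => if P o then (if Q o then a ++ [e o] else a) else a) acc
        = acc ++ ((l.filter P).filter Q).map e := by
  intro l
  induction l with
  | nil => intro acc; simp
  | cons o l ih =>
    intro acc
    by_cases hP : P o <;> by_cases hQ : Q o <;>
      simp [hP, hQ, ih, List.append_assoc]

-- inner loop of rule 6: filter once, append two elements each time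
theorem pv_foldl_inner2_core {α β : Type} (P : α → Bool) (e1 e2 : α → β) :
    ∀ (l : List α) (acc : List β),
      l.foldl (fun a o => if P o then a ++ [e1 o, e2 o] else a) acc
        = acc ++ (l.filter P).flatMap (fun o => [e1 o, e2 o]) := by
  intro l
  induction l with
  | nil => intro acc; simp
  | cons o l ih =>
    intro acc
    by_cases hP : P o
    · simp only [List.foldl_cons, List.filter_cons, hP, if_true, List.flatMap_cons]
      rw [ih, List.append_assoc]
    · simp only [List.foldl_cons, List.filter_cons, if_neg hP]
      exact ih acc

theorem pv_foldl_inner2 {α β : Type} (P : α → Bool) (e1 e2 : α → β) (l : List α) (acc : List β) :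
    l.foldl (fun a o => if P o then (a ++ [e1 o]) ++ [e2 o] else a) acc
      = acc ++ (l.filter P).flatMap (fun o => [e1 o, e2 o]) := by
  have hfun : (fun (a : List β) (o : α) => if P o then (a ++ [e1 o]) ++ [e2 o] else a)
      = (fun (a : List β) (o : α) => if P o then a ++ [e1 o, e2 o] else a) := by
    funext a o; by_cases h : P o <;> simp [h]
  rw [hfun, pv_foldl_inner2_core]

-- flatMap over a filter pushes the test inside
theorem pv_flatMap_filter {α β : Type} (p : α → Bool) (g : α → List β) :
    ∀ (l : List α), (l.filter p).flatMap g = l.flatMap (fun x => if p x then g x else []) := by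
  intro l
  induction l with
  | nil => rfl
  | cons x l ih => by_cases h : p x <;> simp [h, ih]

-- flatMap congruence on members
theorem pv_flatMap_congr {α β : Type} {l : List α} {f g : α → List β}
    (h : ∀ x ∈ l, f x = g x) : l.flatMap f = l.flatMap g := by
  simp only [List.flatMap_def]
  rw [List.map_congr_left h]

-- what the hash index holds at key s: the objects of the `pred` triplets with subject s, in input order
theorem pv_getD_index (kg : List (List String)) (pred s : String) :
    (pvBIndex kg pred).getD s []
      = (((kg.filter (fun o => pvIdx o 1 == pred)).filter (fun o => pvIdx o 0 == s)).map (fun o => pvIdx o 2)) := by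
  have h1 : pvBIndex kg pred
      = ((kg.filter (fun t => pvIdx t 1 == pred)).map (fun t => (pvIdx t 0, pvIdx t 2))).foldl
          (fun d p => d.modify p.1 [] (fun l => l ++ [p.2])) PySem.Dict.empty := by
    rw [List.foldl_map, List.foldl_filter]
    rfl
  rw [h1, PySem.Dict.getD_foldl_modify_append, PySem.Dict.getD_empty, List.nil_append,
    List.filter_map, List.map_map]
  rfl

-- the generic hash-join: A's nested scan over kg equals B's lookup in the kg-wide index, rule by rule
theorem pv_rule_hash_eq (kg : List (List String)) (pOut pIn : String)
    (kf : List String → String) (q : List String → String → Bool)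
    (out : List String → String → List String) :
    kg.foldl (fun acc t =>
      if pvIdx t 1 == pOut then
        kg.foldl (fun a o =>
          if pvIdx o 0 == kf t && pvIdx o 1 == pIn then
            (if q t (pvIdx o 2) then a ++ [out t (pvIdx o 2)] else a)
          else a) acc
      else acc) []
    = (kg.filter (fun t => pvIdx t 1 == pOut)).flatMap
        (fun t => (((pvBIndex kg pIn).getD (kf t) []).filter (q t)).map (out t)) := by
  rw [pv_foldl_outer' (fun t => pvIdx t 1 == pOut)
      (fun acc t => kg.foldl (fun a o =>
          if pvIdx o 0 == kf t && pvIdx o 1 == pIn then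
            (if q t (pvIdx o 2) then a ++ [out t (pvIdx o 2)] else a)
          else a) acc)
      (fun t => ((kg.filter (fun o => pvIdx o 0 == kf t && pvIdx o 1 == pIn)).filter
          (fun o => q t (pvIdx o 2))).map (fun o => out t (pvIdx o 2)))
      (fun acc t => pv_foldl_inner1 _ _ _ kg acc),
    pv_flatMap_filter, List.nil_append]
  refine congrArg (fun f => List.flatMap f kg) (funext fun t => ?_)
  by_cases h : pvIdx t 1 == pOut
  · simp only [h, if_true, pv_getD_index, List.filter_map, List.map_map, List.filter_filter,
      Function.comp_def]
  · simp [h]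

-- dedup: A's 'x not in res' list scan and B's seen-set produce the same list
theorem pv_dedup_loop (l : List (List String)) :
    ∀ (seen : PySem.Set (List String)) (res : List (List String)),
      (∀ x, PySem.Set.contains seen x = res.contains x) →
      (l.foldl (fun (st : PySem.Set (List String) × List (List String)) x =>
          if PySem.Set.contains st.1 x then st else (PySem.Set.add st.1 x, st.2 ++ [x])) (seen, res)).2
        = l.foldl (fun res x => if res.contains x then res else res ++ [x]) res := by
  induction l with
  | nil => intro seen res h; rfl
  | cons x l ih =>
    intro seen res h
    have hx0 := h x
    by_cases hx : res.contains x
    · rw [List.foldl_cons, List.foldl_cons, if_pos (hx0.trans hx), if_pos hx]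
      exact ih seen res h
    · rw [List.foldl_cons, List.foldl_cons,
        if_neg (by rw [hx0]; exact hx), if_neg hx]
      refine ih _ _ ?_
      intro y
      have hy := h y
      show (PySem.Set.add seen x).contains y = (res ++ [x]).contains y
      rw [show PySem.Set.add seen x
            = if PySem.Set.contains seen x = true then seen else seen ++ [x] from rfl,
        if_neg (by rw [hx0]; exact hx)]
      have hmem : (y ∈ seen) ↔ (y ∈ res) := by simpa using hy
      simp [hmem]

theorem pv_dedup_eq (l : List (List String)) : pvRemoveDuplicate l = pvBDedup l := by
  unfold pvRemoveDuplicate pvBDedup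
  exact (pv_dedup_loop l PySem.Set.empty [] (fun x => rfl)).symm

-- pad: the append loop over range(20 - len) is a closed-form replicate
theorem pv_pad_eq (l : List (List String)) : pvParseTriple l = pvBPad l := by
  unfold pvParseTriple pvBPad
  by_cases h : l.length ≤ 20
  · rw [if_pos h]
    rw [show (fun (acc : List (List String)) (_ : Int) => acc ++ [pvNAF])
          = (fun (acc : List (List String)) (x : Int) => acc ++ [(fun _ => pvNAF) x]) from rfl,
      PySem.List.foldl_append_singleton_eq_map, List.map_const', PySem.List.length_pyRange_one]
    norm_num
  · rw [if_neg h]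
    have : (20 - (l.length : Int)).toNat = 0 := by omega
    simp [this]

-- A-side per-rule characterisation: A's rule loop equals a join over the FULL kg
theorem pv_rule1_eq (kg : List (List String)) :
    pvRule1 kg = (pvBPairs kg "co-occurs_with").flatMap
      (fun p => (((pvBIndex kg "affects").getD p.2 []).filter (fun z => p.1 != z)).map
        (fun z => [p.1, "affects", z])) := by
  unfold pvBPairs
  rw [List.flatMap_map]
  exact pv_rule_hash_eq kg "co-occurs_with" "affects" (fun t => pvIdx t 2)
    (fun t z => pvIdx t 0 != z) (fun t z => [pvIdx t 0, "affects", z])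

theorem pv_rule2_eq (kg : List (List String)) :
    pvRule2 kg = (pvBPairs kg "prevents").flatMap
      (fun p => (((pvBIndex kg "causes").getD p.2 []).filter (fun z => p.1 != z)).map
        (fun z => [p.1, "prevents", z])) := by
  unfold pvBPairs
  rw [List.flatMap_map]
  exact pv_rule_hash_eq kg "prevents" "causes" (fun t => pvIdx t 2)
    (fun t z => pvIdx t 0 != z) (fun t z => [pvIdx t 0, "prevents", z])

theorem pv_rule3_eq (kg : List (List String)) :
    pvRule3 kg = (pvBPairs kg "treats").flatMap
      (fun p => (((pvBIndex kg "is_a").getD p.2 []).filter (fun z => p.1 != z)).map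
        (fun z => [p.1, "treats", z])) := by
  unfold pvBPairs
  rw [List.flatMap_map]
  exact pv_rule_hash_eq kg "treats" "is_a" (fun t => pvIdx t 2)
    (fun t z => pvIdx t 0 != z) (fun t z => [pvIdx t 0, "treats", z])

theorem pv_rule4_eq (kg : List (List String)) :
    pvRule4 kg = (pvBPairs kg "diagnoses").flatMap
      (fun p => (((pvBIndex kg "interacts_with").getD p.1 []).filter (fun z => z != p.1)).map
        (fun z => [z, "diagnoses", p.2])) := by
  unfold pvBPairs
  rw [List.flatMap_map]
  exact pv_rule_hash_eq kg "diagnoses" "interacts_with" (fun t => pvIdx t 0)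
    (fun t z => z != pvIdx t 0) (fun t z => [z, "diagnoses", pvIdx t 2])

theorem pv_rule5_eq (kg : List (List String)) :
    pvRule5 kg = (pvBPairs kg "co-occurs_with").flatMap
      (fun p => (((pvBIndex kg "affects").getD p.1 []).filter (fun z => p.2 != z)).map
        (fun z => [p.2, "co-occurs_with", z])) := by
  unfold pvBPairs
  rw [List.flatMap_map]
  exact pv_rule_hash_eq kg "co-occurs_with" "affects" (fun t => pvIdx t 0)
    (fun t z => pvIdx t 2 != z) (fun t z => [pvIdx t 2, "co-occurs_with", z])

theorem pv_rule6_eq (kg : List (List String)) :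
    pvRule6 kg = (pvBPairs kg "prevents").flatMap
      (fun p => ((pvBIndex kg "causes").getD p.2 []).flatMap
        (fun z => [[p.1, "prevents", z], [p.1, "causes", z]])) := by
  unfold pvBPairs pvRule6
  rw [List.flatMap_map]
  rw [pv_foldl_outer' (fun t => pvIdx t 1 == "prevents")
      (fun acc t => kg.foldl (fun a o =>
          if pvIdx o 1 == "causes" && pvIdx o 0 == pvIdx t 2 then
            (a ++ [[pvIdx t 0, "prevents", pvIdx o 2]]) ++ [[pvIdx t 0, "causes", pvIdx o 2]]
          else a) acc)
      (fun t => (kg.filter (fun o => pvIdx o 1 == "causes" && pvIdx o 0 == pvIdx t 2)).flatMap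
          (fun o => [[pvIdx t 0, "prevents", pvIdx o 2], [pvIdx t 0, "causes", pvIdx o 2]]))
      (fun acc t => pv_foldl_inner2 _ _ _ kg acc),
    pv_flatMap_filter, List.nil_append]
  refine congrArg (fun f => List.flatMap f kg) (funext fun t => ?_)
  by_cases h : pvIdx t 1 == "prevents"
  · simp only [h, if_true, pv_getD_index, List.flatMap_map, List.filter_filter]
    refine congrArg (List.flatMap _) (List.filter_congr ?_)
    intro o _
    exact Bool.and_comm _ _
  · simp [h]

-- membership in the pair list
theorem pv_mem_pairs {kg : List (List String)} {pred : String} {p : String × String}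
    (h : p ∈ pvBPairs kg pred) :
    ∃ t ∈ kg, t.getD 1 "" = pred ∧ p.1 = t.getD 0 "" ∧ p.2 = t.getD 2 "" := by
  unfold pvBPairs at h
  obtain ⟨t, ht, rfl⟩ := List.mem_map.mp h
  obtain ⟨htm, htp⟩ := List.mem_filter.mp ht
  refine ⟨t, htm, ?_, by simp [pv_idx_getD], by simp [pv_idx_getD]⟩
  have := of_decide_eq_true htp
  simpa [pv_idx_getD] using (beq_iff_eq.mp htp)

-- restricting the pair scan to well-formed triplets changes nothing when every matching triplet is well-formed
theorem pv_pairs_wf (kg : List (List String)) (pred : String)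
    (h : ∀ t ∈ kg, t.getD 1 "" = pred → 3 ≤ t.length) :
    pvBPairs kg pred = pvBPairs (pvWf kg) pred := by
  unfold pvBPairs pvWf
  rw [List.filter_filter]
  refine congrArg _ (List.filter_congr ?_)
  intro t ht
  by_cases hp : pvIdx t 1 == pred
  · have h3 : 3 ≤ t.length := h t ht (by rw [← pv_idx_getD]; exact beq_iff_eq.mp hp)
    simp [hp, h3]
  · simp [hp]

-- restricting the index to well-formed triplets changes nothing at keys where every matching triplet is well-formed
theorem pv_lookup_wf (kg : List (List String)) (pred s : String)
    (h : ∀ o ∈ kg, o.getD 1 "" = pred → o.getD 0 "" = s → 3 ≤ o.length) :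
    (pvBIndex kg pred).getD s [] = (pvBIndex (pvWf kg) pred).getD s [] := by
  rw [pv_getD_index, pv_getD_index]
  unfold pvWf
  rw [List.filter_filter, List.filter_filter, List.filter_filter]
  refine congrArg _ (List.filter_congr ?_)
  intro o ho
  by_cases h1 : pvIdx o 1 == pred
  · by_cases h0 : pvIdx o 0 == s
    · have h3 : 3 ≤ o.length :=
        h o ho (by rw [← pv_idx_getD]; exact beq_iff_eq.mp h1)
          (by rw [← pv_idx_getD]; exact beq_iff_eq.mp h0)
      simp [h1, h0, h3]
    · simp [h1, h0]
  · simp [h1]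

-- rules 1/5: with Pre_, the kg-wide co-occurrence joins equal the wf joins
theorem pv_rule1_wf (kg : List (List String))
    (hP : ∀ t ∈ kg, t.getD 1 "" = "co-occurs_with" → 3 ≤ t.length)
    (hA : ∀ o ∈ kg, o.getD 1 "" = "affects" → o.length < 3 → ∀ s ∈ kg, s.getD 1 "" = "co-occurs_with" →
      s.getD 2 "" ≠ o.getD 0 "" ∧ s.getD 0 "" ≠ o.getD 0 "") :
    (pvBPairs kg "co-occurs_with").flatMap
      (fun p => (((pvBIndex kg "affects").getD p.2 []).filter (fun z => p.1 != z)).map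
        (fun z => [p.1, "affects", z]))
    = (pvBPairs (pvWf kg) "co-occurs_with").flatMap
      (fun p => (((pvBIndex (pvWf kg) "affects").getD p.2 []).filter (fun z => p.1 != z)).map
        (fun z => [p.1, "affects", z])) := by
  rw [← pv_pairs_wf kg _ hP]
  refine pv_flatMap_congr ?_
  intro p hp
  obtain ⟨s, hsm, hs1, _, hp2⟩ := pv_mem_pairs hp
  rw [pv_lookup_wf kg "affects" p.2 ?_]
  intro o ho ho1 ho0
  by_contra hlen
  exact (hA o ho ho1 (by omega) s hsm hs1).1 (by rw [← hp2, ho0])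

theorem pv_rule5_wf (kg : List (List String))
    (hP : ∀ t ∈ kg, t.getD 1 "" = "co-occurs_with" → 3 ≤ t.length)
    (hA : ∀ o ∈ kg, o.getD 1 "" = "affects" → o.length < 3 → ∀ s ∈ kg, s.getD 1 "" = "co-occurs_with" →
      s.getD 2 "" ≠ o.getD 0 "" ∧ s.getD 0 "" ≠ o.getD 0 "") :
    (pvBPairs kg "co-occurs_with").flatMap
      (fun p => (((pvBIndex kg "affects").getD p.1 []).filter (fun z => p.2 != z)).map
        (fun z => [p.2, "co-occurs_with", z]))
    = (pvBPairs (pvWf kg) "co-occurs_with").flatMap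
      (fun p => (((pvBIndex (pvWf kg) "affects").getD p.1 []).filter (fun z => p.2 != z)).map
        (fun z => [p.2, "co-occurs_with", z])) := by
  rw [← pv_pairs_wf kg _ hP]
  refine pv_flatMap_congr ?_
  intro p hp
  obtain ⟨s, hsm, hs1, hp1, _⟩ := pv_mem_pairs hp
  rw [pv_lookup_wf kg "affects" p.1 ?_]
  intro o ho ho1 ho0
  by_contra hlen
  exact (hA o ho ho1 (by omega) s hsm hs1).2 (by rw [← hp1, ho0])

-- rules 2/6: prevents→causes
theorem pv_causes_lookup (kg : List (List String)) (p : String × String)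
    (hp : p ∈ pvBPairs kg "prevents")
    (hC : ∀ o ∈ kg, o.getD 1 "" = "causes" → o.length < 3 → ∀ s ∈ kg, s.getD 1 "" = "prevents" →
      s.getD 2 "" ≠ o.getD 0 "") :
    (pvBIndex kg "causes").getD p.2 [] = (pvBIndex (pvWf kg) "causes").getD p.2 [] := by
  obtain ⟨s, hsm, hs1, _, hp2⟩ := pv_mem_pairs hp
  refine pv_lookup_wf kg "causes" p.2 ?_
  intro o ho ho1 ho0
  by_contra hlen
  exact hC o ho ho1 (by omega) s hsm hs1 (by rw [← hp2, ho0])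

theorem pv_rule2_wf (kg : List (List String))
    (hP : ∀ t ∈ kg, t.getD 1 "" = "prevents" → 3 ≤ t.length)
    (hC : ∀ o ∈ kg, o.getD 1 "" = "causes" → o.length < 3 → ∀ s ∈ kg, s.getD 1 "" = "prevents" →
      s.getD 2 "" ≠ o.getD 0 "") :
    (pvBPairs kg "prevents").flatMap
      (fun p => (((pvBIndex kg "causes").getD p.2 []).filter (fun z => p.1 != z)).map
        (fun z => [p.1, "prevents", z]))
    = (pvBPairs (pvWf kg) "prevents").flatMap
      (fun p => (((pvBIndex (pvWf kg) "causes").getD p.2 []).filter (fun z => p.1 != z)).map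
        (fun z => [p.1, "prevents", z])) := by
  rw [← pv_pairs_wf kg _ hP]
  refine pv_flatMap_congr ?_
  intro p hp
  rw [pv_causes_lookup kg p hp hC]

theorem pv_rule6_wf (kg : List (List String))
    (hP : ∀ t ∈ kg, t.getD 1 "" = "prevents" → 3 ≤ t.length)
    (hC : ∀ o ∈ kg, o.getD 1 "" = "causes" → o.length < 3 → ∀ s ∈ kg, s.getD 1 "" = "prevents" →
      s.getD 2 "" ≠ o.getD 0 "") :
    (pvBPairs kg "prevents").flatMap
      (fun p => ((pvBIndex kg "causes").getD p.2 []).flatMap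
        (fun z => [[p.1, "prevents", z], [p.1, "causes", z]]))
    = (pvBPairs (pvWf kg) "prevents").flatMap
      (fun p => ((pvBIndex (pvWf kg) "causes").getD p.2 []).flatMap
        (fun z => [[p.1, "prevents", z], [p.1, "causes", z]])) := by
  rw [← pv_pairs_wf kg _ hP]
  refine pv_flatMap_congr ?_
  intro p hp
  rw [pv_causes_lookup kg p hp hC]

-- rule 3: treats→is_a
theorem pv_rule3_wf (kg : List (List String))
    (hP : ∀ t ∈ kg, t.getD 1 "" = "treats" → 3 ≤ t.length)
    (hI : ∀ o ∈ kg, o.getD 1 "" = "is_a" → o.length < 3 → ∀ s ∈ kg, s.getD 1 "" = "treats" →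
      s.getD 2 "" ≠ o.getD 0 "") :
    (pvBPairs kg "treats").flatMap
      (fun p => (((pvBIndex kg "is_a").getD p.2 []).filter (fun z => p.1 != z)).map
        (fun z => [p.1, "treats", z]))
    = (pvBPairs (pvWf kg) "treats").flatMap
      (fun p => (((pvBIndex (pvWf kg) "is_a").getD p.2 []).filter (fun z => p.1 != z)).map
        (fun z => [p.1, "treats", z])) := by
  rw [← pv_pairs_wf kg _ hP]
  refine pv_flatMap_congr ?_
  intro p hp
  obtain ⟨s, hsm, hs1, _, hp2⟩ := pv_mem_pairs hp
  rw [pv_lookup_wf kg "is_a" p.2 ?_]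
  intro o ho ho1 ho0
  by_contra hlen
  exact hI o ho ho1 (by omega) s hsm hs1 (by rw [← hp2, ho0])

-- rule 4: a short diagnoses triplet contributes nothing (every matching interacts_with object equals its subject),
-- and for well-formed ones every matching interacts_with triplet is well-formed
theorem pv_rule4_wf (kg : List (List String))
    (h4 : ∀ t ∈ kg, t.getD 1 "" = "diagnoses" → ∀ o ∈ kg, o.getD 1 "" = "interacts_with" → o.getD 0 "" = t.getD 0 "" →
      3 ≤ o.length ∧ (t.length < 3 → o.getD 2 "" = t.getD 0 "")) :
    (pvBPairs kg "diagnoses").flatMap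
      (fun p => (((pvBIndex kg "interacts_with").getD p.1 []).filter (fun z => z != p.1)).map
        (fun z => [z, "diagnoses", p.2]))
    = (pvBPairs (pvWf kg) "diagnoses").flatMap
      (fun p => (((pvBIndex (pvWf kg) "interacts_with").getD p.1 []).filter (fun z => z != p.1)).map
        (fun z => [z, "diagnoses", p.2])) := by
  unfold pvBPairs pvWf
  rw [List.flatMap_map, List.flatMap_map, List.filter_filter,
    pv_flatMap_filter, pv_flatMap_filter]
  refine pv_flatMap_congr ?_
  intro t ht
  by_cases hd : pvIdx t 1 == "diagnoses"
  · have hd' : t.getD 1 "" = "diagnoses" := by rw [← pv_idx_getD]; exact beq_iff_eq.mp hd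
    by_cases hwf : 3 ≤ t.length
    · -- well-formed: lookup agrees between kg and wf
      simp only [hd, hwf, if_true, decide_true, Bool.and_true]
      rw [show (List.filter (fun t => 3 ≤ t.length) kg : List (List String))
            = pvWf kg from rfl,
        pv_lookup_wf kg "interacts_with" (pvIdx t 0) ?_]
      intro o ho ho1 ho0
      exact (h4 t ht hd' o ho ho1 (by rwa [pv_idx_getD] at ho0)).1
    · -- short: its contribution on the A side is empty, and the wf side skips it
      have hw : (decide (3 ≤ t.length) && (pvIdx t 1 == "diagnoses")) = false := by
        simp [hwf]
      rw [if_pos hd, if_neg (by simp [hwf])]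
      rw [pv_getD_index]
      have hnil : ((List.filter (fun o => pvIdx o 0 == pvIdx t 0)
            (List.filter (fun o => pvIdx o 1 == "interacts_with") kg)).map (fun o => pvIdx o 2)).filter
            (fun z => z != pvIdx t 0) = [] := by
        rw [List.filter_eq_nil_iff]
        intro z hz
        obtain ⟨o, hom, rfl⟩ := List.mem_map.mp hz
        obtain ⟨ho', ho0⟩ := List.mem_filter.mp hom
        obtain ⟨hokg, ho1⟩ := List.mem_filter.mp ho'
        have hz2 : pvIdx o 2 = pvIdx t 0 := by
          rw [pv_idx_getD, pv_idx_getD]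
          exact (h4 t ht hd' o hokg
            (by rw [← pv_idx_getD]; exact beq_iff_eq.mp ho1)
            (by rw [← pv_idx_getD, ← pv_idx_getD (t := t)]; exact beq_iff_eq.mp ho0)).2 (by omega)
        simp [hz2]
      rw [hnil]
      simp
  · simp [hd]

-- ===== VERDICT (by name: the statement is the Claim_ definition above) =====
theorem apply_rules_to_kg_spec : Claim_equal_apply_rules_to_kg := by
  intro kg _ hPre
  obtain ⟨h0, hkw, h4, hA, hC, hI⟩ := hPre
  have hPc : ∀ t ∈ kg, t.getD 1 "" = "co-occurs_with" → 3 ≤ t.length :=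
    fun t ht h => hkw t ht (Or.inl h)
  have hPp : ∀ t ∈ kg, t.getD 1 "" = "prevents" → 3 ≤ t.length :=
    fun t ht h => hkw t ht (Or.inr (Or.inl h))
  have hPt : ∀ t ∈ kg, t.getD 1 "" = "treats" → 3 ≤ t.length :=
    fun t ht h => hkw t ht (Or.inr (Or.inr h))
  unfold Spec_apply_rules_to_kg apply_rules_to_kg apply_rules_to_kg_alt
  rw [pv_rule1_eq, pv_rule2_eq, pv_rule3_eq, pv_rule4_eq, pv_rule5_eq, pv_rule6_eq,
    pv_rule1_wf kg hPc hA, pv_rule2_wf kg hPp hC, pv_rule3_wf kg hPt hI,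
    pv_rule4_wf kg h4, pv_rule5_wf kg hPc hA, pv_rule6_wf kg hPp hC]
  simp only [pv_dedup_eq, pv_pad_eq]
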